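-- pv_equiv track=rewrite | github.com/Janet2023Nov/docx2md-with-comments | docx2md-with-comments/docx2md_v2.py | merge_runs_to_md
-- ===== SOURCE A (Python) =====
-- def merge_runs_to_md(raw_runs):
--     """Merge adjacent runs with same formatting, then convert to markdown.
--     Also absorbs whitespace-only runs into adjacent bold/italic groups,
--     and moves leading/trailing whitespace outside ** markers."""
--     if not raw_runs:
--         return ''
--
--     # Pass 1: absorb whitespace-only plain runs into adjacent formatted groups
--     absorbed = []
--     plain = (False, False, False)
--     for i, (fmt, text) in enumerate(raw_runs):
--         if text.strip() == '' and fmt == plain: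
--             prev_fmt = absorbed[-1][0] if absorbed else None
--             next_fmt = raw_runs[i + 1][0] if i + 1 < len(raw_runs) else None
--             if prev_fmt and next_fmt and prev_fmt == next_fmt and prev_fmt != plain:
--                 absorbed[-1] = (prev_fmt, absorbed[-1][1] + text)
--                 continue
--         absorbed.append((fmt, text))
--
--     # Pass 2: merge consecutive runs with same format
--     groups = []
--     cur_fmt = None
--     cur_texts = []
--     for fmt, text in absorbed:
--         if fmt == cur_fmt:
--             cur_texts.append(text)
--         else:
--             if cur_texts:
--                 groups.append((cur_fmt, ''.join(cur_texts)))
--             cur_fmt = fmt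
--             cur_texts = [text]
--     if cur_texts:
--         groups.append((cur_fmt, ''.join(cur_texts)))
--
--     # Pass 3: convert to markdown with whitespace outside markers
--     parts = []
--     for (bold, italic, strike), text in groups:
--         if not text:
--             continue
--         if bold or italic:
--             stripped = text.strip()
--             if not stripped:
--                 parts.append(text)
--                 continue
--             leading = text[:len(text) - len(text.lstrip())]
--             trailing = text[len(text.rstrip()):]
--             if bold and italic:
--                 inner = f'***{stripped}***'
--             elif bold:
--                 inner = f'**{stripped}**'
--             else:
--                 inner = f'*{stripped}*'
--             if strike:
--                 inner = f'~~{inner}~~'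
--             parts.append(f'{leading}{inner}{trailing}')
--         elif strike:
--             parts.append(f'~~{text}~~')
--         else:
--             parts.append(text)
--
--     return ''.join(parts)
-- ===== SOURCE B (Python) =====
-- # B: local per-run relabeling + span grouping, instead of A's three stateful
-- # passes; a whitespace-only plain run squeezed between two equal non-plain
-- # neighbours simply takes that surrounding format (equivalent to A's
-- # absorption because absorbed runs are never adjacent).
-- PLAIN = (False, False, False)
--
--
-- def _render(fmt, text):
--     if not text:
--         return ''
--     bold, italic, strike = fmt
--     if bold or italic:
--         stripped = text.strip()
--         if not stripped:
--             return text
--         lead = text[:len(text) - len(text.lstrip())]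
--         trail = text[len(text.rstrip()):]
--         marks = '***' if (bold and italic) else ('**' if bold else '*')
--         inner = marks + stripped + marks
--         if strike:
--             inner = '~~' + inner + '~~'
--         return lead + inner + trail
--     if strike:
--         return '~~' + text + '~~'
--     return text
--
--
-- def merge_runs_to_md(raw_runs):
--     nexts = [f for f, _ in raw_runs[1:]] + [None]
--     eff = []
--     prev = None
--     for (f, t), nxt in zip(raw_runs, nexts):
--         if (f == PLAIN and t.strip() == '' and prev is not None
--                 and prev != PLAIN and prev == nxt):
--             eff.append((prev, t))
--         else:
--             eff.append((f, t))
--         prev = f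
--     parts = []
--     rest = eff
--     while rest:
--         f0 = rest[0][0]
--         k = 1
--         while k < len(rest) and rest[k][0] == f0:
--             k += 1
--         parts.append(_render(f0, ''.join(t for _, t in rest[:k])))
--         rest = rest[k:]
--     return ''.join(parts)
-- ===== Notes on version B (the rewrite author's own statement) =====
-- stated objective: alternative
-- what changed: B replaces A's three stateful passes (a fold that mutates the last element of the list built so far, an accumulator-based merge, a convert loop) by a purely local per-run relabeling (a whitespace-only plain run between two equal non-plain neighbours takes their format; correct because absorbed runs are provably never adjacent, so A's absorbed[-1] is always the previous raw run), followed by a single span-grouping-and-render pass.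
import Mathlib
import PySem

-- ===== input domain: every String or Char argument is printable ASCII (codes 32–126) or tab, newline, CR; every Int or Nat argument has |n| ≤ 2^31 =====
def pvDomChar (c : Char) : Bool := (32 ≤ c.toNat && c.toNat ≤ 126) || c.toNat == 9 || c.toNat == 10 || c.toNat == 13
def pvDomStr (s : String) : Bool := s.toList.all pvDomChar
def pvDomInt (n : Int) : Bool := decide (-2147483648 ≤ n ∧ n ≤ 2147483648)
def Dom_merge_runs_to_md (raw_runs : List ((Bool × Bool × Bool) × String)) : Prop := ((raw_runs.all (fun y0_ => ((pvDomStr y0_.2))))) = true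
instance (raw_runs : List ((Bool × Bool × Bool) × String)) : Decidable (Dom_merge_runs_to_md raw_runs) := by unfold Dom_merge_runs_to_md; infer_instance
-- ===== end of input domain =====

-- B replaces A's three stateful passes by a local per-run relabeling plus one
-- span-grouping-and-render pass; same cost, different algorithm (objective: alternative).

def pvPlain : Bool × Bool × Bool := (false, false, false)

-- ===== PORT A =====
-- Pass 1 loop body: absorb whitespace-only plain runs into the previous entry.
def pvStepAbsorb (raw_runs : List ((Bool × Bool × Bool) × String))
    (absorbed : List ((Bool × Bool × Bool) × String))
    (p : Int × ((Bool × Bool × Bool) × String)) : List ((Bool × Bool × Bool) × String) :=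
  let i := p.1; let fmt := p.2.1; let text := p.2.2
  if PySem.Str.strip text == "" && fmt == pvPlain then
    -- prev_fmt = absorbed[-1][0] if absorbed else None; next_fmt = raw_runs[i+1][0] if in range else None
    match absorbed.getLast?, PySem.List.pyGet? raw_runs (i + 1) with
    | some (pf, ptxt), some (nf, _) =>
        if pf == nf && pf != pvPlain then
          absorbed.dropLast ++ [(pf, ptxt ++ text)]   -- absorbed[-1] = (prev_fmt, absorbed[-1][1] + text)
        else absorbed ++ [(fmt, text)]
    | _, _ => absorbed ++ [(fmt, text)]
  else absorbed ++ [(fmt, text)]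

-- Pass 2 loop body: state = (groups, cur_fmt, cur_texts).
def pvStepGroup (st : List (Option (Bool × Bool × Bool) × String) × Option (Bool × Bool × Bool) × List String)
    (p : (Bool × Bool × Bool) × String) :
    List (Option (Bool × Bool × Bool) × String) × Option (Bool × Bool × Bool) × List String :=
  let groups := st.1; let cur_fmt := st.2.1; let cur_texts := st.2.2
  if some p.1 == cur_fmt then (groups, cur_fmt, cur_texts ++ [p.2])
  else if cur_texts.isEmpty then (groups, some p.1, [p.2])
  else (groups ++ [(cur_fmt, PySem.Str.join "" cur_texts)], some p.1, [p.2])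

-- Pass 3 loop body (the none case is unreachable: pass 2 only emits `some` formats;
-- Python would raise there unpacking None).
def pvStepMd (parts : List String) (g : Option (Bool × Bool × Bool) × String) : List String :=
  match g.1 with
  | none => parts
  | some (bold, italic, strike) =>
    let text := g.2
    if text == "" then parts
    else if bold || italic then
      let stripped := PySem.Str.strip text
      if stripped == "" then parts ++ [text]
      else
        let leading := PySem.Str.slice text none (some (PySem.Str.len text - PySem.Str.len (PySem.Str.lstrip text)))
        let trailing := PySem.Str.slice text (some (PySem.Str.len (PySem.Str.rstrip text))) none
        let inner := if bold && italic then "***" ++ stripped ++ "***"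
                     else if bold then "**" ++ stripped ++ "**"
                     else "*" ++ stripped ++ "*"
        let inner2 := if strike then "~~" ++ inner ++ "~~" else inner
        parts ++ [leading ++ inner2 ++ trailing]
    else if strike then parts ++ ["~~" ++ text ++ "~~"]
    else parts ++ [text]

def merge_runs_to_md (raw_runs : List ((Bool × Bool × Bool) × String)) : String :=
  if raw_runs.isEmpty then "" else
    let absorbed := (PySem.List.enumerate raw_runs 0).foldl (pvStepAbsorb raw_runs) []
    let st := absorbed.foldl pvStepGroup ([], none, [])
    let groups := if st.2.2.isEmpty then st.1 else st.1 ++ [(st.2.1, PySem.Str.join "" st.2.2)]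
    let parts := groups.foldl pvStepMd []
    PySem.Str.join "" parts

-- ===== PORT B =====
def pvRender (fmt : Bool × Bool × Bool) (text : String) : String :=
  if text == "" then ""
  else
    let bold := fmt.1; let italic := fmt.2.1; let strike := fmt.2.2
    if bold || italic then
      let stripped := PySem.Str.strip text
      if stripped == "" then text
      else
        let lead := PySem.Str.slice text none (some (PySem.Str.len text - PySem.Str.len (PySem.Str.lstrip text)))
        let trail := PySem.Str.slice text (some (PySem.Str.len (PySem.Str.rstrip text))) none
        let marks := if bold && italic then "***" else if bold then "**" else "*"
        let inner := marks ++ stripped ++ marks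
        let inner2 := if strike then "~~" ++ inner ++ "~~" else inner
        lead ++ inner2 ++ trail
    else if strike then "~~" ++ text ++ "~~"
    else text

-- eff loop body: state = (eff, prev); input = ((f, t), nxt).
def pvEffStep (st : List ((Bool × Bool × Bool) × String) × Option (Bool × Bool × Bool))
    (p : ((Bool × Bool × Bool) × String) × Option (Bool × Bool × Bool)) :
    List ((Bool × Bool × Bool) × String) × Option (Bool × Bool × Bool) :=
  let f := p.1.1; let t := p.1.2; let nxt := p.2
  let entry :=
    match st.2 with
    | some prev =>
        if f == pvPlain && PySem.Str.strip t == "" && prev != pvPlain && some prev == nxt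
        then (prev, t) else (f, t)
    | none => (f, t)
  (st.1 ++ [entry], some f)

def pvEff (raw_runs : List ((Bool × Bool × Bool) × String)) : List ((Bool × Bool × Bool) × String) :=
  ((raw_runs.zip ((raw_runs.drop 1).map (fun q => some q.1) ++ [none])).foldl pvEffStep ([], none)).1

-- the outer while loop over `rest`, as the obvious structural recursion on the suffix
def pvSpans : List ((Bool × Bool × Bool) × String) → List String
  | [] => []
  | c :: rest =>
      pvRender c.1 (PySem.Str.join "" (c.2 :: (rest.takeWhile (fun q => q.1 == c.1)).map (fun q => q.2)))
        :: pvSpans (rest.dropWhile (fun q => q.1 == c.1))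
termination_by l => l.length
decreasing_by
  simp only [List.length_cons]
  exact Nat.lt_succ_of_le (List.length_dropWhile_le _ _)

def merge_runs_to_md_alt (raw_runs : List ((Bool × Bool × Bool) × String)) : String :=
  PySem.Str.join "" (pvSpans (pvEff raw_runs))

-- ===== PRECONDITION & SPEC =====
def Spec_merge_runs_to_md (raw_runs : List ((Bool × Bool × Bool) × String)) (out : String) : Prop := out = merge_runs_to_md_alt raw_runs
instance (raw_runs : List ((Bool × Bool × Bool) × String)) (out : String) : Decidable (Spec_merge_runs_to_md raw_runs out) := by unfold Spec_merge_runs_to_md; infer_instance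

-- ===== CLAIM (what is proved, stated in full; the proofs are below) =====
def Claim_equal_merge_runs_to_md : Prop := ∀ (raw_runs : List ((Bool × Bool × Bool) × String)), Dom_merge_runs_to_md raw_runs → Spec_merge_runs_to_md raw_runs (merge_runs_to_md raw_runs)

-- ===== LEMMAS AND PROOFS =====

-- ---- proof-side model definitions ----

-- pass 1 of A as structural recursion on the remaining runs (lookahead = rest.head?)
def pvAbsRec : List ((Bool × Bool × Bool) × String) → List ((Bool × Bool × Bool) × String) → List ((Bool × Bool × Bool) × String)
  | acc, [] => acc
  | acc, (f, t) :: rest =>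
    if PySem.Str.strip t == "" && f == pvPlain then
      match acc.getLast?, rest.head? with
      | some (pf, ptxt), some (nf, _) =>
          if pf == nf && pf != pvPlain then pvAbsRec (acc.dropLast ++ [(pf, ptxt ++ t)]) rest
          else pvAbsRec (acc ++ [(f, t)]) rest
      | _, _ => pvAbsRec (acc ++ [(f, t)]) rest
    else pvAbsRec (acc ++ [(f, t)]) rest

-- local relabeling with an "absorbed" flag, previous RAW format as context
def pvFlag : (Bool × Bool × Bool) → List ((Bool × Bool × Bool) × String) → List ((Bool × Bool × Bool) × String × Bool)
  | _, [] => []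
  | c, (f, t) :: rest =>
      let b := f == pvPlain && PySem.Str.strip t == "" && c != pvPlain && some c == (rest.head?.map (fun q => q.1))
      ((if b then c else f), t, b) :: pvFlag f rest

def pvUnflag (l : List ((Bool × Bool × Bool) × String × Bool)) : List ((Bool × Bool × Bool) × String) :=
  l.map (fun e => (e.1, e.2.1))

-- collapse flagged entries into the running current entry (what A's pass 1 builds)
def pvGo : ((Bool × Bool × Bool) × String) → List ((Bool × Bool × Bool) × String × Bool) → List ((Bool × Bool × Bool) × String)
  | cur, [] => [cur]
  | cur, (g, u, b) :: rest => if b then pvGo (cur.1, cur.2 ++ u) rest else cur :: pvGo (g, u) rest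

-- eff as structural recursion
def pvEffRec : Option (Bool × Bool × Bool) → List ((Bool × Bool × Bool) × String) → List ((Bool × Bool × Bool) × String)
  | _, [] => []
  | prev?, (f, t) :: rest =>
    (match prev? with
     | some prev =>
        if f == pvPlain && PySem.Str.strip t == "" && prev != pvPlain && some prev == (rest.head?.map (fun q => q.1))
        then (prev, t) else (f, t)
     | none => (f, t)) :: pvEffRec (some f) rest

-- span grouping (groups as data)
def pvSpansG : List ((Bool × Bool × Bool) × String) → List ((Bool × Bool × Bool) × String)
  | [] => []
  | c :: rest =>
      (c.1, PySem.Str.join "" (c.2 :: (rest.takeWhile (fun q => q.1 == c.1)).map (fun q => q.2)))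
        :: pvSpansG (rest.dropWhile (fun q => q.1 == c.1))
termination_by l => l.length
decreasing_by
  simp only [List.length_cons]
  exact Nat.lt_succ_of_le (List.length_dropWhile_le _ _)

def pvConsG (c : (Bool × Bool × Bool) × String) (gs : List ((Bool × Bool × Bool) × String)) : List ((Bool × Bool × Bool) × String) :=
  match gs with
  | (f, t) :: rest => if f == c.1 then (f, c.2 ++ t) :: rest else (c.1, c.2) :: gs
  | [] => [(c.1, c.2)]

-- the flag invariant: a flagged entry carries the format of its predecessor
def pvInv : (Bool × Bool × Bool) → List ((Bool × Bool × Bool) × String × Bool) → Prop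
  | _, [] => True
  | p, (g, _, b) :: rest => (b = true → g = p) ∧ pvInv g rest

-- what pass 3 contributes for one group
def pvPartList (g : Option (Bool × Bool × Bool) × String) : List String :=
  match g.1 with
  | none => []
  | some (bold, italic, strike) =>
    let text := g.2
    if text == "" then []
    else if bold || italic then
      let stripped := PySem.Str.strip text
      if stripped == "" then [text]
      else
        let leading := PySem.Str.slice text none (some (PySem.Str.len text - PySem.Str.len (PySem.Str.lstrip text)))
        let trailing := PySem.Str.slice text (some (PySem.Str.len (PySem.Str.rstrip text))) none
        let inner := if bold && italic then "***" ++ stripped ++ "***"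
                     else if bold then "**" ++ stripped ++ "**"
                     else "*" ++ stripped ++ "*"
        let inner2 := if strike then "~~" ++ inner ++ "~~" else inner
        [leading ++ inner2 ++ trailing]
    else if strike then ["~~" ++ text ++ "~~"]
    else [text]

-- ---- string/join lemmas ----

theorem pvStrExt {a b : String} (h : a.toList = b.toList) : a = b := by
  have := congrArg String.ofList h
  simpa using this

theorem pvCharsJoin0 (ps : List (List Char)) : PySem.Chars.join [] ps = ps.flatten := by
  induction ps with
  | nil => simp [PySem.Chars.join_nil]
  | cons p r ih =>
    cases r with
    | nil => simp [PySem.Chars.join_singleton]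
    | cons q r' =>
      rw [PySem.Chars.join_cons_cons]
      simp only [List.flatten_cons] at ih ⊢
      rw [ih]; simp

theorem pvJoinToList (l : List String) : (PySem.Str.join "" l).toList = (l.map String.toList).flatten := by
  rw [PySem.Str.toList_join]
  have : ("" : String).toList = [] := rfl
  rw [this, pvCharsJoin0]

theorem pvJoin_nil : PySem.Str.join "" [] = "" := by
  apply pvStrExt; rw [pvJoinToList]; simp

theorem pvJoin_cons (x : String) (l : List String) :
    PySem.Str.join "" (x :: l) = x ++ PySem.Str.join "" l := by
  apply pvStrExt; rw [String.toList_append, pvJoinToList, pvJoinToList]; simp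

theorem pvJoin_singleton (x : String) : PySem.Str.join "" [x] = x := by
  apply pvStrExt; rw [pvJoinToList]; simp

theorem pvJoin_append (a b : List String) :
    PySem.Str.join "" (a ++ b) = PySem.Str.join "" a ++ PySem.Str.join "" b := by
  apply pvStrExt; rw [String.toList_append, pvJoinToList, pvJoinToList, pvJoinToList]; simp

theorem pvAppend_assoc (a b c : String) : (a ++ b) ++ c = a ++ (b ++ c) := by
  apply pvStrExt; simp [String.toList_append]

-- ---- pass 1 ----

theorem pvAbsFold (raw : List ((Bool × Bool × Bool) × String)) :
    ∀ (rest : List ((Bool × Bool × Bool) × String)) (k : Nat) (acc : List ((Bool × Bool × Bool) × String)),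
      rest = raw.drop k →
      (PySem.List.enumerate rest (k : Int)).foldl (pvStepAbsorb raw) acc = pvAbsRec acc rest := by
  intro rest
  induction rest with
  | nil => intro k acc _; simp [PySem.List.enumerate_nil, pvAbsRec]
  | cons x rest' ih =>
    intro k acc hk
    rcases x with ⟨f, t⟩
    have hr' : rest' = raw.drop (k + 1) := by
      have : ((f, t) :: rest').drop 1 = (raw.drop k).drop 1 := by rw [← hk]
      simpa [List.drop_drop, Nat.add_comm] using this
    have hpg : PySem.List.pyGet? raw ((k : Int) + 1) = rest'.head? := by
      have hcast : ((k : Int) + 1) = ((k + 1 : Nat) : Int) := by push_cast; ring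
      rw [hcast, PySem.List.pyGet?_natCast]
      rw [hr', List.head?_eq_getElem?, List.getElem?_drop]
    have hcast2 : ((k : Int) + 1) = ((k + 1 : Nat) : Int) := by push_cast; ring
    rw [PySem.List.enumerate_cons, List.foldl_cons]
    have hstep : pvStepAbsorb raw acc ((k : Int), (f, t)) =
        (if PySem.Str.strip t == "" && f == pvPlain then
          match acc.getLast?, rest'.head? with
          | some (pf, ptxt), some (nf, _) =>
              if pf == nf && pf != pvPlain then acc.dropLast ++ [(pf, ptxt ++ t)]
              else acc ++ [(f, t)]
          | _, _ => acc ++ [(f, t)]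
        else acc ++ [(f, t)]) := by
      dsimp only [pvStepAbsorb]
      rw [hpg]
    rw [hstep, hcast2, ih (k + 1) _ hr']
    dsimp only [pvAbsRec]
    split
    · cases hl : acc.getLast? with
      | none => cases hh : rest'.head? <;> simp [hl, hh]
      | some y =>
        rcases y with ⟨pf, ptxt⟩
        cases hh : rest'.head? with
        | none => simp [hl, hh]
        | some z =>
          rcases z with ⟨nf, u⟩
          simp only [hl, hh]
          split <;> rfl
    · rfl

theorem pvMain :
    ∀ (rest init : List ((Bool × Bool × Bool) × String)) (lf : Bool × Bool × Bool) (lt : String) (ctx : Bool × Bool × Bool),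
      (lf = ctx ∨ (ctx = pvPlain ∧ lf ≠ pvPlain ∧ rest.head?.map (fun q => q.1) = some lf)) →
      pvAbsRec (init ++ [(lf, lt)]) rest = init ++ pvGo (lf, lt) (pvFlag ctx rest) := by
  intro rest
  induction rest with
  | nil => intro init lf lt ctx _; simp [pvAbsRec, pvFlag, pvGo]
  | cons x r ih =>
    intro init lf lt ctx hinv
    rcases x with ⟨f, t⟩
    by_cases hws : PySem.Str.strip t = "" ∧ f = pvPlain
    · -- candidate run
      have hlfctx : lf = ctx := by
        rcases hinv with h | ⟨_, hlf, hhd⟩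
        · exact h
        · exfalso
          have : f = lf := by
            simp only [List.head?_cons, Option.map_some] at hhd
            exact (Option.some.inj hhd)
          exact hlf (by rw [← this, hws.2])
      subst hlfctx
      have hif : (PySem.Str.strip t == "" && f == pvPlain) = true := by
        simp [hws.1, hws.2]
      have hgl : (init ++ [(lf, lt)]).getLast? = some (lf, lt) := List.getLast?_concat
      have hdl : (init ++ [(lf, lt)]).dropLast = init := List.dropLast_concat
      cases hh : r.head? with
      | none =>
        have hb : (f == pvPlain && PySem.Str.strip t == "" && lf != pvPlain &&
            (some lf == (r.head?.map (fun q => q.1)))) = false := by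
          simp [hh]
        have hL : pvAbsRec (init ++ [(lf, lt)]) ((f, t) :: r)
            = pvAbsRec ((init ++ [(lf, lt)]) ++ [(f, t)]) r := by
          simp only [pvAbsRec, hif, if_true, hgl, hh]
        rw [hL, ih ((init ++ [(lf, lt)])) f t f (Or.inl rfl)]
        dsimp only [pvFlag]
        rw [hb]
        dsimp only [pvGo]
        simp [List.append_assoc]
      | some y =>
        rcases y with ⟨nf, u⟩
        by_cases hcond : nf = lf ∧ lf ≠ pvPlain
        · have hb : (f == pvPlain && PySem.Str.strip t == "" && lf != pvPlain &&
              (some lf == (r.head?.map (fun q => q.1)))) = true := by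
            simp [hh, hws.1, hws.2, hcond.1, hcond.2]
          have hc : (lf == nf && lf != pvPlain) = true := by simp [hcond.1, hcond.2]
          have hL : pvAbsRec (init ++ [(lf, lt)]) ((f, t) :: r)
              = pvAbsRec (init ++ [(lf, lt ++ t)]) r := by
            simp only [pvAbsRec, hif, if_true, hgl, hh, hc, hdl]
          rw [hL]
          have hnext : r.head?.map (fun q => q.1) = some lf := by simp [hh, hcond.1]
          rw [ih init lf (lt ++ t) f (Or.inr ⟨hws.2, hcond.2, hnext⟩)]
          dsimp only [pvFlag]
          rw [hb]
          simp [pvGo]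
        · have hb : (f == pvPlain && PySem.Str.strip t == "" && lf != pvPlain &&
              (some lf == (r.head?.map (fun q => q.1)))) = false := by
            by_contra hne
            have := eq_true_of_ne_false hne
            simp only [Bool.and_eq_true, beq_iff_eq, bne_iff_ne, hh, Option.map_some] at this
            exact hcond ⟨(Option.some.inj this.2).symm, this.1.2⟩
          have hc : (lf == nf && lf != pvPlain) = false := by
            by_contra hne
            have := eq_true_of_ne_false hne
            simp only [Bool.and_eq_true, beq_iff_eq, bne_iff_ne] at this
            exact hcond ⟨this.1.symm, this.2⟩
          have hL : pvAbsRec (init ++ [(lf, lt)]) ((f, t) :: r)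
              = pvAbsRec ((init ++ [(lf, lt)]) ++ [(f, t)]) r := by
            simp only [pvAbsRec, hif, if_true, hgl, hh, hc, Bool.false_eq_true, if_false]
          rw [hL, ih ((init ++ [(lf, lt)])) f t f (Or.inl rfl)]
          dsimp only [pvFlag]
          rw [hb]
          dsimp only [pvGo]
          simp [List.append_assoc]
    · -- not a candidate
      have hif : (PySem.Str.strip t == "" && f == pvPlain) = false := by
        by_contra hne
        have := eq_true_of_ne_false hne
        simp only [Bool.and_eq_true, beq_iff_eq] at this
        exact hws this
      have hb : (f == pvPlain && PySem.Str.strip t == "" && lf != pvPlain &&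
          (some ctx == (r.head?.map (fun q => q.1)))) = false := by
        by_contra hne
        have := eq_true_of_ne_false hne
        simp only [Bool.and_eq_true, beq_iff_eq] at this
        exact hws ⟨this.1.1.2, this.1.1.1⟩
      have hb' : (f == pvPlain && PySem.Str.strip t == "" && ctx != pvPlain &&
          (some ctx == (r.head?.map (fun q => q.1)))) = false := by
        by_contra hne
        have := eq_true_of_ne_false hne
        simp only [Bool.and_eq_true, beq_iff_eq] at this
        exact hws ⟨this.1.1.2, this.1.1.1⟩
      have hL : pvAbsRec (init ++ [(lf, lt)]) ((f, t) :: r)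
          = pvAbsRec ((init ++ [(lf, lt)]) ++ [(f, t)]) r := by
        simp only [pvAbsRec, hif, Bool.false_eq_true, if_false]
      rw [hL, ih ((init ++ [(lf, lt)])) f t f (Or.inl rfl)]
      dsimp only [pvFlag]
      rw [hb']
      dsimp only [pvGo]
      simp [List.append_assoc]

theorem pvUnflagFlag : ∀ (r : List ((Bool × Bool × Bool) × String)) (c : Bool × Bool × Bool),
    pvUnflag (pvFlag c r) = pvEffRec (some c) r := by
  intro r
  induction r with
  | nil => intro c; rfl
  | cons x rest ih =>
    intro c
    rcases x with ⟨f, t⟩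
    dsimp only [pvFlag, pvEffRec, pvUnflag, List.map_cons]
    rw [show (List.map (fun e => (e.1, e.2.1)) (pvFlag f rest)) = pvUnflag (pvFlag f rest) from rfl,
      ih f]
    split <;> rfl

theorem pvInvFlag : ∀ (r : List ((Bool × Bool × Bool) × String)) (c p : Bool × Bool × Bool),
    (p = c ∨ c = pvPlain) → pvInv p (pvFlag c r) := by
  intro r
  induction r with
  | nil => intro c p _; trivial
  | cons x rest ih =>
    intro c p hcp
    rcases x with ⟨f, t⟩
    dsimp only [pvFlag, pvInv]
    by_cases hb : (f == pvPlain && PySem.Str.strip t == "" && c != pvPlain &&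
        (some c == (rest.head?.map (fun q => q.1)))) = true
    · have hcomp := hb
      simp only [Bool.and_eq_true, beq_iff_eq, bne_iff_ne] at hcomp
      have hcnp : c ≠ pvPlain := hcomp.1.2
      have hpc : p = c := by
        rcases hcp with h | h
        · exact h
        · exact absurd h hcnp
      have hf : f = pvPlain := hcomp.1.1.1
      rw [hb]
      refine ⟨fun _ => by simp [hpc], ?_⟩
      have : pvInv c (pvFlag pvPlain rest) := ih pvPlain c (Or.inr rfl)
      simpa [hf] using this
    · rw [Bool.not_eq_true] at hb
      rw [hb]
      exact ⟨by simp, ih f f (Or.inl rfl)⟩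

-- ---- spans ----

theorem pvSpansG_cons (c : (Bool × Bool × Bool) × String) (X : List ((Bool × Bool × Bool) × String)) :
    pvSpansG (c :: X) = pvConsG c (pvSpansG X) := by
  cases X with
  | nil => simp [pvSpansG, pvConsG, pvJoin_singleton]
  | cons x X' =>
    rcases x with ⟨f, v⟩
    by_cases h : f = c.1
    · subst h
      rw [pvSpansG, pvSpansG]
      simp only [List.takeWhile_cons, List.dropWhile_cons, beq_self_eq_true, if_true]
      dsimp only [pvConsG]
      rw [if_pos (by simp)]
      simp [pvJoin_cons]
    · have h1 : List.takeWhile (fun q => q.1 == c.1) ((f, v) :: X') = [] := by simp [h]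
      have h2 : List.dropWhile (fun q => q.1 == c.1) ((f, v) :: X') = (f, v) :: X' := by simp [h]
      rw [pvSpansG, h1, h2]
      obtain ⟨w, r2, hsh⟩ : ∃ w r2, pvSpansG ((f, v) :: X') = (f, w) :: r2 := by
        rw [pvSpansG]; exact ⟨_, _, rfl⟩
      rw [hsh]
      dsimp only [pvConsG]
      rw [show (f == c.1) = false from by simp [h]]
      simp [pvJoin_singleton]

theorem pvConsG_merge (c : Bool × Bool × Bool) (t u : String) (S : List ((Bool × Bool × Bool) × String)) :
    pvConsG (c, t ++ u) S = pvConsG (c, t) (pvConsG (c, u) S) := by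
  cases S with
  | nil => simp [pvConsG]
  | cons x rest =>
    rcases x with ⟨f, v⟩
    by_cases h : f = c
    · subst h
      simp [pvConsG, pvAppend_assoc]
    · simp [pvConsG, h, Ne.symm]

theorem pvConsG_shape (c : (Bool × Bool × Bool) × String) (S : List ((Bool × Bool × Bool) × String)) :
    ∃ w r2, pvConsG c S = (c.1, w) :: r2 := by
  cases S with
  | nil => exact ⟨c.2, [], rfl⟩
  | cons x rest =>
    rcases x with ⟨f, v⟩
    dsimp only [pvConsG]
    by_cases h : f = c.1
    · rw [if_pos (by simpa using h)]
      exact ⟨c.2 ++ v, rest, by rw [h]⟩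
    · rw [if_neg (by simpa using h)]
      exact ⟨c.2, (f, v) :: rest, rfl⟩

theorem pvGoSpans : ∀ (fl : List ((Bool × Bool × Bool) × String × Bool)) (cur : (Bool × Bool × Bool) × String),
    pvInv cur.1 fl → pvSpansG (pvGo cur fl) = pvSpansG (cur :: pvUnflag fl) := by
  intro fl
  induction fl with
  | nil => intro cur _; rfl
  | cons e rest ih =>
    intro cur hinv
    rcases e with ⟨g, u, b⟩
    obtain ⟨hb, hrest⟩ := hinv
    cases b with
    | true =>
      have hg : g = cur.1 := hb rfl
      dsimp only [pvGo]
      rw [if_pos rfl]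
      rw [ih (cur.1, cur.2 ++ u) (by rw [← hg]; exact hrest)]
      rw [pvSpansG_cons]
      dsimp only [pvUnflag, List.map_cons]
      rw [pvSpansG_cons, pvSpansG_cons]
      rw [show (List.map (fun e => (e.1, e.2.1)) rest) = pvUnflag rest from rfl]
      rw [hg, pvConsG_merge]
    | false =>
      dsimp only [pvGo]
      rw [if_neg (by simp)]
      rw [pvSpansG_cons, ih (g, u) hrest]
      dsimp only [pvUnflag, List.map_cons]
      rw [pvSpansG_cons, pvSpansG_cons, pvSpansG_cons]

-- ---- pass 2 ----

theorem pvGroupFold :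
    ∀ (l : List ((Bool × Bool × Bool) × String)) (groups : List (Option (Bool × Bool × Bool) × String))
      (cf : Bool × Bool × Bool) (ts : List String), ts ≠ [] →
      (if (l.foldl pvStepGroup (groups, some cf, ts)).2.2.isEmpty
       then (l.foldl pvStepGroup (groups, some cf, ts)).1
       else (l.foldl pvStepGroup (groups, some cf, ts)).1
            ++ [((l.foldl pvStepGroup (groups, some cf, ts)).2.1,
                 PySem.Str.join "" (l.foldl pvStepGroup (groups, some cf, ts)).2.2)]) =
      groups ++ (pvConsG (cf, PySem.Str.join "" ts) (pvSpansG l)).map (fun g => (some g.1, g.2)) := by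
  intro l
  induction l with
  | nil =>
    intro groups cf ts hts
    simp only [List.foldl_nil]
    rw [if_neg (by simpa [List.isEmpty_iff] using hts)]
    simp [pvSpansG, pvConsG]
  | cons x r ih =>
    intro groups cf ts hts
    rcases x with ⟨f, t⟩
    rw [List.foldl_cons]
    by_cases hf : f = cf
    · subst hf
      have hstep : pvStepGroup (groups, some f, ts) (f, t) = (groups, some f, ts ++ [t]) := by
        dsimp only [pvStepGroup]; rw [if_pos (by simp)]
      rw [hstep, ih groups f (ts ++ [t]) (by simp)]
      rw [pvSpansG_cons, ← pvConsG_merge, pvJoin_append, pvJoin_singleton]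
    · have hstep : pvStepGroup (groups, some cf, ts) (f, t)
          = (groups ++ [(some cf, PySem.Str.join "" ts)], some f, [t]) := by
        dsimp only [pvStepGroup]
        rw [if_neg (by simp [hf]), if_neg (by simpa [List.isEmpty_iff] using hts)]
      rw [hstep, ih (groups ++ [(some cf, PySem.Str.join "" ts)]) f [t] (by simp)]
      rw [pvJoin_singleton, pvSpansG_cons]
      obtain ⟨w, r2, hsh⟩ := pvConsG_shape (f, t) (pvSpansG r)
      rw [hsh]
      dsimp only [pvConsG]
      rw [if_neg (by simpa using hf)]
      simp [List.append_assoc]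

theorem pvGroupAll (l : List ((Bool × Bool × Bool) × String)) :
    (if (l.foldl pvStepGroup ([], none, [])).2.2.isEmpty
     then (l.foldl pvStepGroup ([], none, [])).1
     else (l.foldl pvStepGroup ([], none, [])).1
          ++ [((l.foldl pvStepGroup ([], none, [])).2.1,
               PySem.Str.join "" (l.foldl pvStepGroup ([], none, [])).2.2)]) =
    (pvSpansG l).map (fun g => (some g.1, g.2)) := by
  cases l with
  | nil => simp [pvSpansG]
  | cons y ys =>
    rw [List.foldl_cons]
    have hstep : pvStepGroup ([], none, []) y = ([], some y.1, [y.2]) := by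
      dsimp only [pvStepGroup]
      rw [if_neg (by simp), if_pos (by simp)]
    rw [hstep, pvGroupFold ys [] y.1 [y.2] (by simp)]
    rw [pvJoin_singleton]
    rw [show pvConsG (y.1, y.2) (pvSpansG ys) = pvSpansG ((y.1, y.2) :: ys) from (pvSpansG_cons _ _).symm]
    simp

-- ---- pass 3 ----

theorem pvStepMd_eq (parts : List String) (g : Option (Bool × Bool × Bool) × String) :
    pvStepMd parts g = parts ++ pvPartList g := by
  rcases g with ⟨fo, text⟩
  cases fo with
  | none => simp [pvStepMd, pvPartList]
  | some f =>
    rcases f with ⟨b, i, st⟩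
    dsimp only [pvStepMd, pvPartList]
    split_ifs <;> simp

theorem pvMdFold : ∀ (gs : List (Option (Bool × Bool × Bool) × String)) (parts : List String),
    gs.foldl pvStepMd parts = parts ++ gs.flatMap pvPartList := by
  intro gs
  induction gs with
  | nil => intro parts; simp
  | cons g r ih =>
    intro parts
    rw [List.foldl_cons, pvStepMd_eq, ih]
    simp [List.append_assoc]

theorem pvPart_render (f : Bool × Bool × Bool) (t : String) :
    PySem.Str.join "" (pvPartList (some f, t)) = pvRender f t := by
  rcases f with ⟨b, i, st⟩
  dsimp only [pvPartList, pvRender]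
  split_ifs <;> simp_all [pvJoin_singleton, pvJoin_nil]

theorem pvJoinParts (gs : List ((Bool × Bool × Bool) × String)) :
    PySem.Str.join "" ((gs.map (fun g => ((some g.1 : Option (Bool × Bool × Bool)), g.2))).flatMap pvPartList)
      = PySem.Str.join "" (gs.map (fun g => pvRender g.1 g.2)) := by
  induction gs with
  | nil => rfl
  | cons x r ih =>
    rw [List.map_cons, List.flatMap_cons, List.map_cons, pvJoin_append, pvJoin_cons,
      pvPart_render, ih]

-- ---- B side ----

theorem pvEffFold :
    ∀ (raw : List ((Bool × Bool × Bool) × String)) (prev : Option (Bool × Bool × Bool))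
      (acc : List ((Bool × Bool × Bool) × String)),
      ((raw.zip ((raw.drop 1).map (fun q => some q.1) ++ [none])).foldl pvEffStep (acc, prev)).1 =
        acc ++ pvEffRec prev raw := by
  intro raw
  induction raw with
  | nil => intro prev acc; simp [pvEffRec]
  | cons x r ih =>
    intro prev acc
    have hz : (x :: r).zip (((x :: r).drop 1).map (fun q => some q.1) ++ [none])
        = (x, r.head?.map (fun q => q.1)) :: r.zip ((r.drop 1).map (fun q => some q.1) ++ [none]) := by
      cases r <;> simp
    rw [hz, List.foldl_cons]
    rcases x with ⟨f, t⟩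
    cases prev with
    | none =>
      rw [show pvEffStep (acc, none) ((f, t), r.head?.map (fun q => q.1))
          = (acc ++ [(f, t)], some f) from rfl]
      rw [ih (some f) (acc ++ [(f, t)])]
      dsimp only [pvEffRec]
      simp [List.append_assoc]
    | some pv =>
      dsimp only [pvEffStep, pvEffRec]
      rw [ih (some f) _]
      split <;> simp [List.append_assoc]

theorem pvSpans_eq (l : List ((Bool × Bool × Bool) × String)) :
    pvSpans l = (pvSpansG l).map (fun g => pvRender g.1 g.2) := by
  induction l using pvSpans.induct with
  | case1 => simp [pvSpans, pvSpansG]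
  | case2 c rest ih =>
    rw [pvSpans, pvSpansG, List.map_cons, ih]

-- ===== VERDICT (by name: the statement is the Claim_ definition above) =====
-- first step of pass 1 always appends (absorbed is empty)
theorem pvAbsRec_nil_cons (x : (Bool × Bool × Bool) × String) (r : List ((Bool × Bool × Bool) × String)) :
    pvAbsRec [] (x :: r) = pvAbsRec [x] r := by
  rcases x with ⟨f, t⟩
  dsimp only [pvAbsRec]
  split
  · rfl
  · rfl

theorem pvEffRec_none_cons (x : (Bool × Bool × Bool) × String) (r : List ((Bool × Bool × Bool) × String)) :
    pvEffRec none (x :: r) = x :: pvEffRec (some x.1) r := by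
  rcases x with ⟨f, t⟩; rfl

-- ===== VERDICT (by name: the statement is the Claim_ definition above) =====
theorem merge_runs_to_md_spec : Claim_equal_merge_runs_to_md := by
  unfold Claim_equal_merge_runs_to_md
  intro raw _dom
  unfold Spec_merge_runs_to_md
  cases raw with
  | nil =>
    show merge_runs_to_md [] = merge_runs_to_md_alt []
    simp [merge_runs_to_md, merge_runs_to_md_alt, pvEff, pvSpans, pvJoin_nil]
  | cons x r =>
    show merge_runs_to_md (x :: r) = merge_runs_to_md_alt (x :: r)
    have key : (PySem.List.enumerate (x :: r) 0).foldl (pvStepAbsorb (x :: r)) []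
        = pvGo x (pvFlag x.1 r) := by
      have h0 : ((0 : Nat) : Int) = (0 : Int) := by norm_num
      rw [← h0, pvAbsFold (x :: r) (x :: r) 0 [] (by simp)]
      rw [pvAbsRec_nil_cons]
      have := pvMain r [] x.1 x.2 x.1 (Or.inl rfl)
      simpa using this
    have heff : pvEff (x :: r) = x :: pvEffRec (some x.1) r := by
      unfold pvEff
      rw [pvEffFold (x :: r) none []]
      rw [pvEffRec_none_cons]
      rfl
    have hspans : pvSpansG (pvGo x (pvFlag x.1 r)) = pvSpansG (pvEff (x :: r)) := by
      rw [pvGoSpans (pvFlag x.1 r) x (pvInvFlag r x.1 x.1 (Or.inl rfl))]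
      rw [pvUnflagFlag r x.1, heff]
    simp only [merge_runs_to_md, merge_runs_to_md_alt, List.isEmpty_cons,
      Bool.false_eq_true, if_false]
    rw [key, pvGroupAll, pvMdFold, List.nil_append, pvJoinParts, hspans, pvSpans_eq]
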